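-- pv_equiv track=rewrite | github.com/limkyouyou/12_python_projects | tic_tac_toe/player.py | filter_double
-- ===== SOURCE A (Python) =====
-- from collections import Counter
--
-- def filter_double(filtered_list, marker):
--     res = []
--     double_list = list(filter(lambda item:item.count(marker) == 2, filtered_list))
--     if double_list:
--         flat_double = [x for y in double_list for x in y if x != marker]
--         flat_double.sort(key=Counter(flat_double).get, reverse=True)
--         for item in flat_double:
--             if item not in res: res.append(item)
--     return res
-- ===== SOURCE B (Python) =====
-- from collections import Counter
--
-- def filter_double(filtered_list, marker):
--     double_lines = [line for line in filtered_list if line.count(marker) == 2]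
--     flat = [cell for line in double_lines for cell in line if cell != marker]
--     counts = Counter(flat)
--     uniques = dict.fromkeys(flat)
--     return sorted(uniques, key=counts.get, reverse=True)
-- ===== Notes on version B (the rewrite author's own statement) =====
-- stated objective: simpler
-- what changed: B dedups the flattened cells first (dict.fromkeys) and sorts only the unique cells by a precomputed Counter, instead of stably sorting the full duplicated list and then deduping with a quadratic 'item not in res' loop.
import Mathlib
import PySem

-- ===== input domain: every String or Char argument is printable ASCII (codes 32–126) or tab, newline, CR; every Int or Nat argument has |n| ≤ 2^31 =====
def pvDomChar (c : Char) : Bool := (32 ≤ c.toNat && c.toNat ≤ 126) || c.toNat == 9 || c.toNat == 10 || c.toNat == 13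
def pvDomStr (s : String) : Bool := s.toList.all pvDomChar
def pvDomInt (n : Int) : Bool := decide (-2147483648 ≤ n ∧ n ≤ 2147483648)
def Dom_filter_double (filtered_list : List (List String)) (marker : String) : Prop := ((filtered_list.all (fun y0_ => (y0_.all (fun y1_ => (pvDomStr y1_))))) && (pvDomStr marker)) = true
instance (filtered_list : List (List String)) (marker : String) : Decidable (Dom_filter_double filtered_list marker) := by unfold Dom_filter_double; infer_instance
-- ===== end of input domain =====

-- B dedups the flattened cells first and sorts only the unique cells by a precomputed counter,
-- instead of A's stable sort of the full duplicated list followed by an 'item not in res' dedup loop (objective: simpler).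

-- ===== PORT A =====
def filter_double (filtered_list : List (List String)) (marker : String) : List String :=
  let res : List String := []
  let double_list := filtered_list.filter (fun item => PySem.List.count item marker == 2)
  if double_list.isEmpty then res
  else
    let flat_double := double_list.flatMap (fun y => y.filter (fun x => !(x == marker)))
    -- sort key Counter(flat_double).get ported as the multiplicity in flat_double:
    -- exact, since every element being sorted occurs in flat_double, where Counter(...).get returns its count
    let flat_sorted := PySem.List.sorted flat_double (fun x => PySem.List.count flat_double x) true
    flat_sorted.foldl (fun res item => if item ∈ res then res else res ++ [item]) res

-- ===== PORT B =====
def filter_double_alt (filtered_list : List (List String)) (marker : String) : List String :=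
  let double_lines := filtered_list.filter (fun line => PySem.List.count line marker == 2)
  let flat := double_lines.flatMap (fun line => line.filter (fun cell => !(cell == marker)))
  -- counts = Counter(flat); counts.get ported as the multiplicity in flat (exact: every unique cell occurs in flat)
  let counts := fun cell => PySem.List.count flat cell
  let uniques := PySem.List.dedup flat   -- dict.fromkeys(flat)
  PySem.List.sorted uniques counts true

-- ===== PRECONDITION & SPEC =====
def Spec_filter_double (filtered_list : List (List String)) (marker : String) (out : List String) : Prop := out = filter_double_alt filtered_list marker
instance (filtered_list : List (List String)) (marker : String) (out : List String) : Decidable (Spec_filter_double filtered_list marker out) := by unfold Spec_filter_double; infer_instance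

-- ===== CLAIM (what is proved, stated in full; the proofs are below) =====
def Claim_equal_filter_double : Prop := ∀ (filtered_list : List (List String)) (marker : String), Dom_filter_double filtered_list marker → Spec_filter_double filtered_list marker (filter_double filtered_list marker)

-- ===== LEMMAS AND PROOFS =====

-- one step of PySem's reverse=True stable insertion sort
def insR (key : String → Nat) (acc : List String) (x : String) : List String :=
  PySem.List.insertBy (fun a b => decide (key b < key a)) x acc

-- ordered dedup of l relative to an already-seen set
def ddFrom (seen : List String) : List String → List String
  | [] => []
  | x :: r => if x ∈ seen then ddFrom seen r else x :: ddFrom (x :: seen) r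

lemma sortedRev_eq_foldl_insR (xs : List String) (key : String → Nat) :
    PySem.List.sorted xs key true = xs.foldl (insR key) [] := by
  rw [PySem.List.sorted_rev_eq_foldl_insertBy]; rfl

lemma insertBy_split (q : String → String → Bool) (x : String) (acc : List String) :
    PySem.List.insertBy q x acc
      = acc.takeWhile (fun y => !q x y) ++ x :: acc.dropWhile (fun y => !q x y) := by
  induction acc with
  | nil => rfl
  | cons y t ih =>
      by_cases h : q x y = true
      · simp [PySem.List.insertBy, h]
      · simp only [Bool.not_eq_true] at h
        simp [PySem.List.insertBy, h, ih]

lemma pairwise_insR (key : String → Nat) {acc : List String} (x : String)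
    (h : acc.Pairwise (fun a b => key b ≤ key a)) :
    (insR key acc x).Pairwise (fun a b => key b ≤ key a) := by
  induction acc with
  | nil => simp [insR, PySem.List.insertBy]
  | cons y t ih =>
      rcases List.pairwise_cons.mp h with ⟨hy, ht⟩
      by_cases hlt : key y < key x
      · have hstep : insR key (y :: t) x = x :: y :: t := by
          simp [insR, PySem.List.insertBy, hlt]
        rw [hstep]
        refine List.pairwise_cons.mpr ⟨?_, h⟩
        intro m hm
        rcases List.mem_cons.mp hm with rfl | hm
        · omega
        · exact le_trans (hy m hm) (le_of_lt hlt)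
      · have : insR key (y :: t) x = y :: insR key t x := by
          simp [insR, PySem.List.insertBy, hlt]
        rw [this]
        refine List.pairwise_cons.mpr ⟨?_, ih ht⟩
        intro m hm
        rcases (PySem.List.mem_insertBy _ _ _ _).mp hm with rfl | hm
        · omega
        · exact hy m hm

lemma mem_takeWhile_of_pairwise (key : String → Nat) {acc : List String} {x : String}
    (h : acc.Pairwise (fun a b => key b ≤ key a)) (hx : x ∈ acc) :
    x ∈ acc.takeWhile (fun y => !decide (key y < key x)) := by
  induction acc with
  | nil => cases hx
  | cons y t ih =>
      rcases List.pairwise_cons.mp h with ⟨hy, ht⟩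
      by_cases hlt : key y < key x
      · exfalso
        rcases List.mem_cons.mp hx with rfl | hx
        · omega
        · have := hy x hx; omega
      · rw [List.takeWhile_cons]
        simp only [hlt, decide_false, Bool.not_false, if_true]
        rcases List.mem_cons.mp hx with rfl | hx
        · exact List.mem_cons_self
        · exact List.mem_cons_of_mem _ (ih ht hx)

lemma ins_mid (key : String → Nat) (z x : String) (hzx : ¬ key x < key z) :
    ∀ (w v : List String), ∃ a b,
      insR key (w ++ v) z = a ++ b ∧ insR key (w ++ x :: v) z = a ++ x :: b := by
  intro w
  induction w with
  | nil =>
      intro v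
      refine ⟨[], insR key v z, rfl, ?_⟩
      simp [insR, PySem.List.insertBy, hzx]
  | cons y w1 ih =>
      intro v
      by_cases hy : key y < key z
      · exact ⟨z :: y :: w1, v, by simp [insR, PySem.List.insertBy, hy], by simp [insR, PySem.List.insertBy, hy]⟩
      · rcases ih v with ⟨a, b, h1, h2⟩
        refine ⟨y :: a, b, ?_, ?_⟩
        · simpa [insR, PySem.List.insertBy, hy] using congrArg (y :: ·) h1
        · simpa [insR, PySem.List.insertBy, hy] using congrArg (y :: ·) h2

lemma ins_dup (key : String → Nat) (z x : String) :
    ∀ (u v : List String), x ∈ u → ∃ u' v',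
      insR key (u ++ v) z = u' ++ v' ∧ insR key (u ++ x :: v) z = u' ++ x :: v' ∧ x ∈ u' := by
  intro u
  induction u with
  | nil => intro v hx; cases hx
  | cons y u1 ih =>
      intro v hx
      by_cases hy : key y < key z
      · refine ⟨z :: y :: u1, v, ?_, ?_, ?_⟩
        · simp [insR, PySem.List.insertBy, hy]
        · simp [insR, PySem.List.insertBy, hy]
        · exact List.mem_cons_of_mem _ hx
      · rcases List.mem_cons.mp hx with rfl | hx1
        · -- x heads the prefix; the scan passes x in both lists
          rcases ins_mid key z x (by exact hy) u1 v with ⟨a, b, h1, h2⟩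
          refine ⟨x :: a, b, ?_, ?_, List.mem_cons_self⟩
          · simpa [insR, PySem.List.insertBy, hy] using congrArg (x :: ·) h1
          · simpa [insR, PySem.List.insertBy, hy] using congrArg (x :: ·) h2
        · rcases ih v hx1 with ⟨u', v', h1, h2, hx'⟩
          refine ⟨y :: u', v', ?_, ?_, List.mem_cons_of_mem _ hx'⟩
          · simpa [insR, PySem.List.insertBy, hy] using congrArg (y :: ·) h1
          · simpa [insR, PySem.List.insertBy, hy] using congrArg (y :: ·) h2

lemma dedup_mid (u v : List String) (x : String) (hx : x ∈ u) :
    PySem.List.dedup (u ++ x :: v) = PySem.List.dedup (u ++ v) := by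
  have hofu : ∀ s : List String, List.foldl PySem.Set.add (PySem.Set.ofList u) (x :: s)
      = List.foldl PySem.Set.add (PySem.Set.ofList u) s := by
    intro s
    have hmem : x ∈ PySem.Set.ofList u := (PySem.Set.mem_ofList u x).mpr hx
    have : PySem.Set.add (PySem.Set.ofList u) x = PySem.Set.ofList u := by
      simp [PySem.Set.add, hmem]
    simp [List.foldl_cons, this]
  simp only [PySem.List.dedup_eq_ofList, PySem.Set.ofList, List.foldl_append]
  exact hofu v

lemma foldl_ins_dup (key : String → Nat) :
    ∀ (r u v : List String) (x : String), x ∈ u →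
      PySem.List.dedup (r.foldl (insR key) (u ++ x :: v))
        = PySem.List.dedup (r.foldl (insR key) (u ++ v)) := by
  intro r
  induction r with
  | nil => intro u v x hx; exact dedup_mid u v x hx
  | cons z r ih =>
      intro u v x hx
      rcases ins_dup key z x u v hx with ⟨u', v', h1, h2, hx'⟩
      simp only [List.foldl_cons]
      rw [show insR key (u ++ x :: v) z = u' ++ x :: v' from h2,
          show insR key (u ++ v) z = u' ++ v' from h1]
      exact ih u' v' x hx'

lemma foldl_add_eq_ddFrom : ∀ (l s s' : List String), (∀ y, y ∈ s ↔ y ∈ s') →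
    List.foldl PySem.Set.add s' l = s' ++ ddFrom s l := by
  intro l
  induction l with
  | nil => intro s s' _; simp [ddFrom]
  | cons x r ih =>
      intro s s' hss
      by_cases hx : x ∈ s
      · have hx' : x ∈ s' := (hss x).mp hx
        have : PySem.Set.add s' x = s' := by simp [PySem.Set.add, hx']
        simp only [List.foldl_cons, this, ddFrom, if_pos hx]
        exact ih s s' hss
      · have hx' : x ∉ s' := fun h => hx ((hss x).mpr h)
        have : PySem.Set.add s' x = s' ++ [x] := by simp [PySem.Set.add, hx']
        simp only [List.foldl_cons, this, ddFrom, if_neg hx]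
        rw [ih (x :: s) (s' ++ [x]) (by intro y; simp only [List.mem_cons, List.mem_append, hss y]; tauto)]
        simp
  
lemma dedup_eq_ddFrom (l : List String) : PySem.List.dedup l = ddFrom [] l := by
  have := foldl_add_eq_ddFrom l [] [] (by intro y; rfl)
  simpa [PySem.List.dedup_eq_ofList, PySem.Set.ofList, PySem.Set.empty] using this

lemma sort_main (key : String → Nat) :
    ∀ (l s acc : List String), (∀ y, y ∈ s ↔ y ∈ acc) →
      acc.Pairwise (fun a b => key b ≤ key a) →
      PySem.List.dedup (l.foldl (insR key) acc)
        = PySem.List.dedup ((ddFrom s l).foldl (insR key) acc) := by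
  intro l
  induction l with
  | nil => intro s acc _ _; rfl
  | cons x r ih =>
      intro s acc hss hpw
      by_cases hx : x ∈ s
      · have hxa : x ∈ acc := (hss x).mp hx
        have hsplit := insertBy_split (fun a b => decide (key b < key a)) x acc
        set u := acc.takeWhile (fun y => !decide (key y < key x)) with hu
        set v := acc.dropWhile (fun y => !decide (key y < key x)) with hv
        have hacc : acc = u ++ v := (List.takeWhile_append_dropWhile).symm
        have hins : insR key acc x = u ++ x :: v := hsplit
        have hxu : x ∈ u := mem_takeWhile_of_pairwise key hpw hxa
        simp only [List.foldl_cons, ddFrom, if_pos hx]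
        calc PySem.List.dedup (r.foldl (insR key) (insR key acc x))
            = PySem.List.dedup (r.foldl (insR key) (u ++ x :: v)) := by rw [hins]
          _ = PySem.List.dedup (r.foldl (insR key) (u ++ v)) := foldl_ins_dup key r u v x hxu
          _ = PySem.List.dedup (r.foldl (insR key) acc) := by rw [← hacc]
          _ = PySem.List.dedup ((ddFrom s r).foldl (insR key) acc) := ih s acc hss hpw
      · simp only [List.foldl_cons, ddFrom, if_neg hx]
        refine ih (x :: s) (insR key acc x) ?_ (pairwise_insR key x hpw)
        intro y
        rw [show insR key acc x = PySem.List.insertBy (fun a b => decide (key b < key a)) x acc from rfl,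
            PySem.List.mem_insertBy]
        simp [List.mem_cons, hss y]

lemma ddFrom_eq_self_of_nodup : ∀ (l s : List String), l.Nodup → (∀ y ∈ l, y ∉ s) →
    ddFrom s l = l := by
  intro l
  induction l with
  | nil => intro s _ _; rfl
  | cons x r ih =>
      intro s hnd hdisj
      rcases List.nodup_cons.mp hnd with ⟨hxr, hr⟩
      rw [ddFrom, if_neg (hdisj x List.mem_cons_self)]
      congr 1
      refine ih (x :: s) hr ?_
      intro y hy
      simp only [List.mem_cons, not_or]
      exact ⟨fun h => hxr (h ▸ hy), hdisj y (List.mem_cons_of_mem _ hy)⟩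

lemma dedup_eq_self_of_nodup {l : List String} (h : l.Nodup) : PySem.List.dedup l = l := by
  rw [dedup_eq_ddFrom]
  exact ddFrom_eq_self_of_nodup l [] h (by simp)

lemma foldl_mem_eq_foldl_add : ∀ (l s : List String),
    l.foldl (fun res item => if item ∈ res then res else res ++ [item]) s
      = List.foldl PySem.Set.add s l := by
  intro l
  induction l with
  | nil => intro s; rfl
  | cons x r ih =>
      intro s
      have : (if x ∈ s then s else s ++ [x]) = PySem.Set.add s x := by
        by_cases h : x ∈ s
        · simp [PySem.Set.add, h]
        · simp [PySem.Set.add, h]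
      simp only [List.foldl_cons, this, ih]

-- the heart: ordered dedup of the stable reverse-sort equals the stable reverse-sort of the ordered dedup
lemma dedup_sorted_rev (l : List String) (key : String → Nat) :
    PySem.List.dedup (PySem.List.sorted l key true)
      = PySem.List.sorted (PySem.List.dedup l) key true := by
  have h1 : PySem.List.dedup (PySem.List.sorted l key true)
      = PySem.List.dedup (PySem.List.sorted (PySem.List.dedup l) key true) := by
    rw [sortedRev_eq_foldl_insR l key, sortedRev_eq_foldl_insR (PySem.List.dedup l) key,
        dedup_eq_ddFrom l]
    exact sort_main key l [] [] (by intro y; rfl) List.Pairwise.nil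
  have hnd : (PySem.List.sorted (PySem.List.dedup l) key true).Nodup :=
    (PySem.List.sorted_perm (PySem.List.dedup l) key true).symm.nodup (PySem.List.nodup_dedup l)
  rw [h1, dedup_eq_self_of_nodup hnd]

lemma foldl_add_nil_eq_dedup (xs : List String) :
    List.foldl PySem.Set.add ([] : List String) xs = PySem.List.dedup xs := rfl

-- ===== VERDICT (by name: the statement is the Claim_ definition above) =====
theorem filter_double_spec : Claim_equal_filter_double := by
  intro filtered_list marker _
  unfold Spec_filter_double
  simp only [filter_double, filter_double_alt]
  by_cases h : (filtered_list.filter (fun item => PySem.List.count item marker == 2)).isEmpty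
  · rw [List.isEmpty_iff] at h
    rw [h]
    rfl
  · rw [if_neg (by simpa using h)]
    rw [foldl_mem_eq_foldl_add, foldl_add_nil_eq_dedup]
    exact dedup_sorted_rev _ _
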